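-- pv_equiv track=rewrite | github.com/pokerdio/generic | aoc/2024/day7.py | tryPlusMul
-- ===== SOURCE A (Python) =====
-- def tryPlusMul(target, current, v, v_idx):
--     if v_idx == len(v):
--         return target == current
--
--     newCurrent = v[v_idx] + current
--     if newCurrent <= target and tryPlusMul(target, newCurrent, v, v_idx + 1):
--         return True
--
--     newCurrent = v[v_idx] * current
--     if newCurrent <= target and tryPlusMul(target, newCurrent, v, v_idx + 1):
--         return True
--     return False
-- ===== SOURCE B (Python) =====
-- def _next_level(target, x, vals):
--     nxt = set()
--     for c in vals:
--         for nv in (x + c, x * c):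
--             if nv <= target:
--                 nxt.add(nv)
--     return nxt
--
--
-- def tryPlusMul(target, current, v, v_idx):
--     vals = {current}
--     for x in v[v_idx:]:
--         vals = _next_level(target, x, vals)
--     return target in vals
-- ===== Notes on version B (the rewrite author's own statement) =====
-- stated objective: alternative
-- what changed: Replaces the exponential branching recursion with an iterative breadth-first pass that maintains the deduplicated set of reachable values (those <= target) for each suffix position and finally tests membership of target.
-- outside the precondition, e.g. on tryPlusMul(9, 1, [2, 3], -1): A returns True, B returns False
import Mathlib
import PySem

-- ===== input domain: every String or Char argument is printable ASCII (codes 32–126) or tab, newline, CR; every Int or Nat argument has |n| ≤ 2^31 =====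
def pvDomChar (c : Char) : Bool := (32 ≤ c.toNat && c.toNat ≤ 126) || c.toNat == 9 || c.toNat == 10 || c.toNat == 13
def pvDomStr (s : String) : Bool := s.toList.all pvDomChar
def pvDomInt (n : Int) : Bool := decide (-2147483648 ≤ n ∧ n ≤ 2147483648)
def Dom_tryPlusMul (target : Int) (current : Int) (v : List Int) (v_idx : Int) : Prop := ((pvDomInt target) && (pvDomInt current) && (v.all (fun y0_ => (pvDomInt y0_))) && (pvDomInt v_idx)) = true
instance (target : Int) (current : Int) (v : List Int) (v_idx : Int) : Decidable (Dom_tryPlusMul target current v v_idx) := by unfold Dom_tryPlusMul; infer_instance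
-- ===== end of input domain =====

-- B replaces A's branching recursion by an iterative pass over the suffix that keeps the
-- deduplicated set of reachable values (values above target dropped) and finally tests target's membership.

-- ===== PORT A =====
def tryPlusMul (target : Int) (current : Int) (v : List Int) (v_idx : Int) : Bool :=
  if v_idx = (v.length : Int) then target == current
  else
    match hx : PySem.List.pyGet? v v_idx with
    | none => false  -- Python raises IndexError here; excluded by Pre_tryPlusMul
    | some x =>
      if (decide (x + current ≤ target)) && tryPlusMul target (x + current) v (v_idx + 1) then true
      else if (decide (x * current ≤ target)) && tryPlusMul target (x * current) v (v_idx + 1) then true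
      else false
termination_by ((v.length : Int) - v_idx).toNat
decreasing_by
  all_goals
    have h1 : PySem.List.pyGet? v v_idx ≠ none := by simp [hx]
    rw [ne_eq, PySem.List.pyGet?_eq_none_iff, not_not] at h1
    simp [PySem.Raise.InRange] at h1
    omega

-- ===== PORT B =====
-- helper _next_level from Source B: the next level set built from level set vals on element x
def nextLevel (target : Int) (x : Int) (vals : PySem.Set Int) : PySem.Set Int :=
  vals.foldl
    (fun nxt c =>
      [x + c, x * c].foldl
        (fun nxt nv => if nv ≤ target then PySem.Set.add nxt nv else nxt) nxt)
    PySem.Set.empty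

def tryPlusMul_alt (target : Int) (current : Int) (v : List Int) (v_idx : Int) : Bool :=
  let vals : PySem.Set Int :=
    (PySem.List.slice v (some v_idx) none).foldl
      (fun vals x => nextLevel target x vals)
      (PySem.Set.ofList [current])
  PySem.Set.contains vals target

-- ===== PRECONDITION & SPEC =====
-- Pre_ restricts v_idx to the natural domain 0 ≤ v_idx ≤ len(v): for v_idx > len(v) or v_idx < -len(v)
-- Python A raises IndexError, and for -len(v) ≤ v_idx < 0 A's negative-index wraparound reads the last
-- elements and then the WHOLE list again, an accident of Python indexing outside the function's natural domain.
def Pre_tryPlusMul (target : Int) (current : Int) (v : List Int) (v_idx : Int) : Prop :=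
  0 ≤ v_idx ∧ v_idx ≤ (v.length : Int)
instance (target : Int) (current : Int) (v : List Int) (v_idx : Int) : Decidable (Pre_tryPlusMul target current v v_idx) := by unfold Pre_tryPlusMul; infer_instance

def pvWitness_tryPlusMul : Int × Int × List Int × Int := (29, 0, ((2 : Int) :: (3 : Int) :: (5 : Int) :: []), 0)

def Spec_tryPlusMul (target : Int) (current : Int) (v : List Int) (v_idx : Int) (out : Bool) : Prop := out = tryPlusMul_alt target current v v_idx
instance (target : Int) (current : Int) (v : List Int) (v_idx : Int) (out : Bool) : Decidable (Spec_tryPlusMul target current v v_idx out) := by unfold Spec_tryPlusMul; infer_instance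

-- ===== CLAIM (what is proved, stated in full; the proofs are below) =====
def Claim_equal_tryPlusMul : Prop := ∀ (target : Int) (current : Int) (v : List Int) (v_idx : Int), Dom_tryPlusMul target current v v_idx → Pre_tryPlusMul target current v v_idx → Spec_tryPlusMul target current v v_idx (tryPlusMul target current v v_idx)

-- ===== LEMMAS AND PROOFS =====

-- A's recursion, rephrased as structural recursion on the suffix list (proof helper).
def aRec (target c : Int) : List Int → Bool
  | [] => target == c
  | x :: rest =>
      if (decide (x + c ≤ target)) && aRec target (x + c) rest then true
      else if (decide (x * c ≤ target)) && aRec target (x * c) rest then true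
      else false

theorem nextLevel_body_mem (target x c y : Int) (acc : PySem.Set Int) :
    y ∈ [x + c, x * c].foldl
        (fun nxt nv => if nv ≤ target then PySem.Set.add nxt nv else nxt) acc ↔
      y ∈ acc ∨ ((y = x + c ∨ y = x * c) ∧ y ≤ target) := by
  simp only [List.foldl_cons, List.foldl_nil]
  by_cases h1 : x + c ≤ target <;> by_cases h2 : x * c ≤ target
  · simp only [if_pos h1, if_pos h2, PySem.Set.mem_add]
    constructor
    · rintro ((h | rfl) | rfl)
      · exact Or.inl h
      · exact Or.inr ⟨Or.inl rfl, h1⟩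
      · exact Or.inr ⟨Or.inr rfl, h2⟩
    · rintro (h | ⟨rfl | rfl, hy⟩)
      · exact Or.inl (Or.inl h)
      · exact Or.inl (Or.inr rfl)
      · exact Or.inr rfl
  · simp only [if_pos h1, if_neg h2, PySem.Set.mem_add]
    constructor
    · rintro (h | rfl)
      · exact Or.inl h
      · exact Or.inr ⟨Or.inl rfl, h1⟩
    · rintro (h | ⟨rfl | rfl, hy⟩)
      · exact Or.inl h
      · exact Or.inr rfl
      · exact absurd hy h2
  · simp only [if_neg h1, if_pos h2, PySem.Set.mem_add]
    constructor
    · rintro (h | rfl)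
      · exact Or.inl h
      · exact Or.inr ⟨Or.inr rfl, h2⟩
    · rintro (h | ⟨rfl | rfl, hy⟩)
      · exact Or.inl h
      · exact absurd hy h1
      · exact Or.inr rfl
  · simp only [if_neg h1, if_neg h2]
    constructor
    · exact Or.inl
    · rintro (h | ⟨rfl | rfl, hy⟩)
      · exact h
      · exact absurd hy h1
      · exact absurd hy h2

theorem mem_nextLevel_aux (target x : Int) (l : List Int) (acc : PySem.Set Int) (y : Int) :
    y ∈ l.foldl
        (fun nxt c =>
          [x + c, x * c].foldl
            (fun nxt nv => if nv ≤ target then PySem.Set.add nxt nv else nxt) nxt)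
        acc ↔
      y ∈ acc ∨ ∃ c ∈ l, (y = x + c ∨ y = x * c) ∧ y ≤ target := by
  induction l generalizing acc with
  | nil => simp
  | cons c cs ih =>
    rw [List.foldl_cons, ih, nextLevel_body_mem]
    simp only [List.mem_cons]
    constructor
    · rintro ((h | h) | ⟨d, hd, h⟩)
      · exact Or.inl h
      · exact Or.inr ⟨c, Or.inl rfl, h⟩
      · exact Or.inr ⟨d, Or.inr hd, h⟩
    · rintro (h | ⟨d, (rfl | hd), h⟩)
      · exact Or.inl (Or.inl h)
      · exact Or.inl (Or.inr h)
      · exact Or.inr ⟨d, hd, h⟩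

theorem mem_nextLevel (target x : Int) (s : PySem.Set Int) (y : Int) :
    y ∈ nextLevel target x s ↔ ∃ c ∈ s, (y = x + c ∨ y = x * c) ∧ y ≤ target := by
  rw [nextLevel, mem_nextLevel_aux]; simp

-- the levels fold reaches target iff some start value in S satisfies aRec on the suffix
theorem foldl_nextLevel_char (target : Int) (l : List Int) (S : PySem.Set Int) :
    target ∈ l.foldl (fun vals x => nextLevel target x vals) S ↔
      ∃ c ∈ S, aRec target c l = true := by
  induction l generalizing S with
  | nil =>
    simp only [List.foldl_nil, aRec]
    constructor
    · intro h; exact ⟨target, h, by simp⟩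
    · rintro ⟨c, hc, h⟩
      have : target = c := by simpa using h
      exact this ▸ hc
  | cons x rest ih =>
    rw [List.foldl_cons, ih]
    constructor
    · rintro ⟨c', hc', h⟩
      rw [mem_nextLevel] at hc'
      obtain ⟨c, hc, hor, hle⟩ := hc'
      refine ⟨c, hc, ?_⟩
      simp only [aRec]
      rcases hor with rfl | rfl <;> simp [hle, h]
    · rintro ⟨c, hc, h⟩
      simp only [aRec] at h
      split_ifs at h with h1 h2
      · simp only [Bool.and_eq_true, decide_eq_true_eq] at h1
        exact ⟨x + c, (mem_nextLevel _ _ _ _).2 ⟨c, hc, Or.inl rfl, h1.1⟩, h1.2⟩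
      · simp only [Bool.and_eq_true, decide_eq_true_eq] at h2
        exact ⟨x * c, (mem_nextLevel _ _ _ _).2 ⟨c, hc, Or.inr rfl, h2.1⟩, h2.2⟩

-- A's port agrees with aRec on the dropped suffix, for in-range natural indices.
theorem tryPlusMul_eq_aRec (target : Int) (v : List Int) :
    ∀ (n k : Nat) (current : Int), v.length - k = n → k ≤ v.length →
      tryPlusMul target current v (k : Int) = aRec target current (v.drop k) := by
  intro n
  induction n with
  | zero =>
    intro k current hn hk
    have hkl : k = v.length := by omega
    subst hkl
    rw [tryPlusMul]
    simp [aRec, List.drop_length]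
  | succ n ih =>
    intro k current hn hk
    have hlt : k < v.length := by omega
    have hg : PySem.List.pyGet? v ((k : Nat) : Int) = some v[k] := by
      rw [PySem.List.pyGet?_natCast, List.getElem?_eq_getElem hlt]
    rw [tryPlusMul]
    rw [if_neg (by exact_mod_cast Nat.ne_of_lt hlt)]
    rw [List.drop_eq_getElem_cons hlt]
    simp only [aRec]
    split
    · next heq => rw [hg] at heq; exact absurd heq (by simp)
    · next x heq =>
        rw [hg] at heq
        injection heq with hx
        subst hx
        have h1 : (k : Int) + 1 = ((k + 1 : Nat) : Int) := by push_cast; ring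
        rw [h1, ih (k + 1) (v[k] + current) (by omega) (by omega),
            ih (k + 1) (v[k] * current) (by omega) (by omega)]

theorem bool_eq_iff (a b : Bool) : a = b ↔ ((a = true) ↔ (b = true)) := by
  cases a <;> cases b <;> simp

-- ===== VERDICT (by name: the statement is the Claim_ definition above) =====
theorem tryPlusMul_spec : Claim_equal_tryPlusMul := by
  intro target current v v_idx _ hpre
  obtain ⟨h0, hle⟩ := hpre
  show tryPlusMul target current v v_idx = tryPlusMul_alt target current v v_idx
  rw [show v_idx = ((v_idx.toNat : Nat) : Int) from (Int.toNat_of_nonneg h0).symm]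
  rw [tryPlusMul_eq_aRec target v (v.length - v_idx.toNat) v_idx.toNat current rfl (by omega)]
  simp only [tryPlusMul_alt, PySem.List.slice_from_natCast]
  rw [bool_eq_iff, PySem.Set.contains_iff,
      foldl_nextLevel_char target (v.drop v_idx.toNat) (PySem.Set.ofList [current])]
  constructor
  · intro h
    exact ⟨current, by simp [PySem.Set.mem_ofList], h⟩
  · rintro ⟨c, hc, h⟩
    have : c = current := by simpa [PySem.Set.mem_ofList] using hc
    exact this ▸ h
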